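-- pv_equiv track=rewrite | github.com/ashleigh-hopkins/MAC-577IF2-E-research | research_archive/analyze_hex_changes.py | analyze_profilecode_changes
-- ===== SOURCE A (Python) =====
-- from typing import List, Dict, Any
--
-- def hex_to_bytes(hex_string: str) -> List[str]:
--     """Convert hex string to list of byte pairs."""
--     # Remove 'fc' prefix and split into byte pairs
--     clean_hex = hex_string[2:] if hex_string.startswith('fc') else hex_string
--     return [clean_hex[i:i+2] for i in range(0, len(clean_hex), 2)]
--
-- def analyze_profilecode_changes(data: List[Dict[str, Any]]) -> Dict[str, Dict[int, List[str]]]: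
--     """Analyze which bytes change in each profilecode group across iterations."""
--     profilecode_changes = {}
--
--     # Process each profilecode index
--     for profile_idx in range(5):  # Assuming 5 profilecode entries
--         profilecode_changes[f"PROFILE[{profile_idx}]"] = {}
--
--         # Get all hex strings for this profilecode index across iterations
--         profile_strings = []
--         for iteration in data:
--             if profile_idx < len(iteration['profilecodes']):
--                 profile_strings.append(iteration['profilecodes'][profile_idx])
--
--         if not profile_strings:
--             continue
--
--         # Convert to byte arrays
--         byte_arrays = [hex_to_bytes(profile) for profile in profile_strings]
--
--         # Find bytes that change
--         if byte_arrays: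
--             max_length = max(len(arr) for arr in byte_arrays)
--
--             for byte_pos in range(max_length):
--                 values_at_pos = []
--                 for arr in byte_arrays:
--                     if byte_pos < len(arr):
--                         values_at_pos.append(arr[byte_pos])
--                     else:
--                         values_at_pos.append('--')
--
--                 # Check if this byte position has variations
--                 unique_values = set(values_at_pos)
--                 if len(unique_values) > 1:
--                     profilecode_changes[f"PROFILE[{profile_idx}]"][byte_pos] = values_at_pos
--
--     return profilecode_changes
-- ===== SOURCE B (Python) =====
-- from typing import List, Dict, Any
--
-- def hex_to_bytes(hex_string: str) -> List[str]:
--     """Convert hex string to list of byte pairs."""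
--     clean_hex = hex_string[2:] if hex_string.startswith('fc') else hex_string
--     return [clean_hex[i:i+2] for i in range(0, len(clean_hex), 2)]
--
-- def analyze_profilecode_changes(data: List[Dict[str, Any]]) -> Dict[str, Dict[int, List[str]]]:
--     """Single pass per profile index: maintain the transposed columns while
--     scanning the iterations once, then keep the columns that vary."""
--     result = {}
--     for profile_idx in range(5):
--         cols = []  # cols[p] = values seen so far at byte position p, padded with '--'
--         n = 0      # number of hex strings folded into cols so far
--         for iteration in data:
--             pcs = iteration['profilecodes']
--             if profile_idx < len(pcs):
--                 arr = hex_to_bytes(pcs[profile_idx])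
--                 cols += [['--'] * n for _ in range(len(arr) - len(cols))]
--                 for p, col in enumerate(cols):
--                     col.append(arr[p] if p < len(arr) else '--')
--                 n += 1
--         result[f"PROFILE[{profile_idx}]"] = {
--             p: col for p, col in enumerate(cols) if len(set(col)) > 1
--         }
--     return result
-- ===== Notes on version B (the rewrite author's own statement) =====
-- stated objective: alternative
-- what changed: Replaces A's collect-all-strings-then-scan-every-array-per-byte-position nested loops (profile_strings, byte_arrays, max_length, re-indexing each array at each position) with a single pass over the iterations that maintains the transposed padded columns incrementally, finishing with a dict comprehension over the columns.
import Mathlib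
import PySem

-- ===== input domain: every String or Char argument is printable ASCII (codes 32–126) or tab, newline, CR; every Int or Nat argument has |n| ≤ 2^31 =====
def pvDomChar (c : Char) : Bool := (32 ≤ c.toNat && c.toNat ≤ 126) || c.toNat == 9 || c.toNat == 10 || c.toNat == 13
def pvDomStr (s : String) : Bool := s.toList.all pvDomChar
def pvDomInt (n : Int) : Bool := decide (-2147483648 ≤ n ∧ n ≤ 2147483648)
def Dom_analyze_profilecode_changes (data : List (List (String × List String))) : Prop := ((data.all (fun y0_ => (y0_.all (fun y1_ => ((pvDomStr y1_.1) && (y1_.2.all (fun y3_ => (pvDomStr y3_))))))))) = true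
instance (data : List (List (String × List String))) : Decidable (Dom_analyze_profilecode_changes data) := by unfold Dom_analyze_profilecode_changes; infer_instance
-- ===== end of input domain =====

-- B maintains the transposed padded columns in one pass over the iterations instead of
-- A's collect-strings-then-rescan-every-array-at-every-byte-position nested loops.

-- ===== PORT A =====
-- shared module helper (identical in Source A and Source B)
def hex_to_bytes (hex_string : String) : List String :=
  let clean_hex := if PySem.Str.startswith hex_string "fc" then PySem.Str.slice hex_string (some 2) none else hex_string
  (PySem.List.pyRange 0 (PySem.Str.len clean_hex) 2).map (fun i => PySem.Str.slice clean_hex (some i) (some (i + 2)))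

def analyze_profilecode_changes (data : List (List (String × List String))) : List (String × List (Int × List String)) :=
  let profilecode_changes : PySem.Dict String (PySem.Dict Int (List String)) :=
    (PySem.List.pyRange 0 5 1).foldl (fun profilecode_changes profile_idx =>
      let key := "PROFILE[" ++ PySem.Int.toStr profile_idx ++ "]"
      let profilecode_changes := profilecode_changes.insert key PySem.Dict.empty
      let profile_strings := data.foldl (fun acc iteration =>
        let pcs := (PySem.Dict.get? (PySem.Dict.mk iteration) "profilecodes").getD []
        if profile_idx < PySem.List.len pcs then
          acc ++ [(PySem.List.pyGet? pcs profile_idx).getD ""]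
        else acc) []
      if profile_strings = [] then profilecode_changes
      else
        let byte_arrays := profile_strings.map hex_to_bytes
        if byte_arrays ≠ [] then
          let max_length := (PySem.List.max? (byte_arrays.map PySem.List.len) (fun x => x)).getD 0
          let inner := (PySem.List.pyRange 0 max_length 1).foldl (fun inner byte_pos =>
            let values_at_pos := byte_arrays.foldl (fun values_at_pos arr =>
              if byte_pos < PySem.List.len arr then
                values_at_pos ++ [(PySem.List.pyGet? arr byte_pos).getD ""]
              else values_at_pos ++ ["--"]) []
            let unique_values := PySem.Set.ofList values_at_pos
            if 1 < unique_values.length then inner.insert byte_pos values_at_pos else inner)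
            (profilecode_changes.getD key PySem.Dict.empty)
          profilecode_changes.insert key inner
        else profilecode_changes) PySem.Dict.empty
  profilecode_changes.items.map (fun p => (p.1, p.2.items))

-- ===== PORT B =====
def analyze_profilecode_changes_alt (data : List (List (String × List String))) : List (String × List (Int × List String)) :=
  (PySem.List.pyRange 0 5 1).foldl (fun result profile_idx =>
    let st := data.foldl (fun (st : List (List String) × Int) iteration =>
      let pcs := (PySem.Dict.get? (PySem.Dict.mk iteration) "profilecodes").getD []
      if profile_idx < PySem.List.len pcs then
        let arr := hex_to_bytes ((PySem.List.pyGet? pcs profile_idx).getD "")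
        -- cols += [['--'] * n for _ in range(len(arr) - len(cols))]  (n ≥ 0, so '* n' is replicate n.toNat)
        let cols := st.1 ++ (PySem.List.pyRange 0 (PySem.List.len arr - PySem.List.len st.1) 1).map
          (fun _ => List.replicate st.2.toNat "--")
        -- for p, col in enumerate(cols): col.append(arr[p] if p < len(arr) else '--')
        let cols := (PySem.List.enumerate cols 0).map (fun pc =>
          pc.2 ++ [if pc.1 < PySem.List.len arr then PySem.List.pyGetD arr pc.1 "" else "--"])
        (cols, st.2 + 1)
      else st) ([], 0)
    result ++ [("PROFILE[" ++ PySem.Int.toStr profile_idx ++ "]",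
      (PySem.List.enumerate st.1 0).filter (fun pc => 1 < (PySem.Set.ofList pc.2).length))])
  []

-- ===== PRECONDITION & SPEC =====
-- Pre_: every iteration dict must have the key "profilecodes" (Python raises KeyError otherwise).
def Pre_analyze_profilecode_changes (data : List (List (String × List String))) : Prop :=
  ∀ it ∈ data, (PySem.Dict.mk it).contains "profilecodes" = true
instance (data : List (List (String × List String))) : Decidable (Pre_analyze_profilecode_changes data) := by unfold Pre_analyze_profilecode_changes; infer_instance

def pvWitness_analyze_profilecode_changes : (List (List (String × List String))) :=
  [[("profilecodes", ["fc0a1b", "fc0a2b"])], [("profilecodes", ["fc0a1c"])]]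

def Spec_analyze_profilecode_changes (data : List (List (String × List String))) (out : List (String × List (Int × List String))) : Prop := out = analyze_profilecode_changes_alt data
instance (data : List (List (String × List String))) (out : List (String × List (Int × List String))) : Decidable (Spec_analyze_profilecode_changes data out) := by unfold Spec_analyze_profilecode_changes; infer_instance

-- ===== CLAIM (what is proved, stated in full; the proofs are below) =====
def Claim_equal_analyze_profilecode_changes : Prop := ∀ (data : List (List (String × List String))), Dom_analyze_profilecode_changes data → Pre_analyze_profilecode_changes data → Spec_analyze_profilecode_changes data (analyze_profilecode_changes data)

-- ===== LEMMAS AND PROOFS =====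

-- the 'profilecodes' list of one iteration
def pvPcs (it : List (String × List String)) : List String :=
  (PySem.Dict.get? (PySem.Dict.mk it) "profilecodes").getD []

-- the byte arrays selected for profile index i
def pvArrs (i : Int) (data : List (List (String × List String))) : List (List String) :=
  (data.filter (fun it => decide (i < PySem.List.len (pvPcs it)))).map
    (fun it => hex_to_bytes ((PySem.List.pyGet? (pvPcs it) i).getD ""))

def pvMaxLen (arrs : List (List String)) : Nat := arrs.foldl (fun m a => max m a.length) 0

def pvCol (arrs : List (List String)) (p : Nat) : List String := arrs.map (fun a => a.getD p "--")

def pvCols (arrs : List (List String)) : List (List String) := (List.range (pvMaxLen arrs)).map (pvCol arrs)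

def pvKey (i : Int) : String := "PROFILE[" ++ PySem.Int.toStr i ++ "]"

-- A's per-index step (syntactically the body of A's outer fold)
def pvStepA (data : List (List (String × List String)))
    (profilecode_changes : PySem.Dict String (PySem.Dict Int (List String))) (profile_idx : Int) :
    PySem.Dict String (PySem.Dict Int (List String)) :=
  let key := "PROFILE[" ++ PySem.Int.toStr profile_idx ++ "]"
  let profilecode_changes := profilecode_changes.insert key PySem.Dict.empty
  let profile_strings := data.foldl (fun acc iteration =>
    let pcs := (PySem.Dict.get? (PySem.Dict.mk iteration) "profilecodes").getD []
    if profile_idx < PySem.List.len pcs then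
      acc ++ [(PySem.List.pyGet? pcs profile_idx).getD ""]
    else acc) []
  if profile_strings = [] then profilecode_changes
  else
    let byte_arrays := profile_strings.map hex_to_bytes
    if byte_arrays ≠ [] then
      let max_length := (PySem.List.max? (byte_arrays.map PySem.List.len) (fun x => x)).getD 0
      let inner := (PySem.List.pyRange 0 max_length 1).foldl (fun inner byte_pos =>
        let values_at_pos := byte_arrays.foldl (fun values_at_pos arr =>
          if byte_pos < PySem.List.len arr then
            values_at_pos ++ [(PySem.List.pyGet? arr byte_pos).getD ""]
          else values_at_pos ++ ["--"]) []
        let unique_values := PySem.Set.ofList values_at_pos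
        if 1 < unique_values.length then inner.insert byte_pos values_at_pos else inner)
        (profilecode_changes.getD key PySem.Dict.empty)
      profilecode_changes.insert key inner
    else profilecode_changes

-- the inner dict A ends up storing under pvKey i
def pvInnerA (i : Int) (data : List (List (String × List String))) : PySem.Dict Int (List String) :=
  let arrs := pvArrs i data
  if arrs = [] then PySem.Dict.empty
  else
    (PySem.List.pyRange 0 ((pvMaxLen arrs : Nat) : Int) 1).foldl (fun inner byte_pos =>
      let values_at_pos := arrs.foldl (fun values_at_pos arr =>
        if byte_pos < PySem.List.len arr then
          values_at_pos ++ [(PySem.List.pyGet? arr byte_pos).getD ""]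
        else values_at_pos ++ ["--"]) []
      if 1 < (PySem.Set.ofList values_at_pos).length then inner.insert byte_pos values_at_pos else inner)
      PySem.Dict.empty

-- the entry B stores under pvKey i
def pvEntryB (i : Int) (data : List (List (String × List String))) : List (Int × List String) :=
  (PySem.List.enumerate (pvCols (pvArrs i data)) 0).filter (fun pc => 1 < (PySem.Set.ofList pc.2).length)

theorem pvArrs_cons (i : Int) (it : List (String × List String)) (rest : List (List (String × List String))) :
    pvArrs i (it :: rest) = if i < PySem.List.len (pvPcs it)
      then hex_to_bytes ((PySem.List.pyGet? (pvPcs it) i).getD "") :: pvArrs i rest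
      else pvArrs i rest := by
  by_cases h : i < ((pvPcs it).length : Int) <;> simp [pvArrs, h]

theorem pvMaxLen_append (arrs : List (List String)) (arr : List String) :
    pvMaxLen (arrs ++ [arr]) = max (pvMaxLen arrs) arr.length := by
  simp [pvMaxLen, List.foldl_append]

theorem pvFoldLB : ∀ (arrs : List (List String)) (x : Nat), x ≤ arrs.foldl (fun m a => max m a.length) x := by
  intro arrs
  induction arrs with
  | nil => simp
  | cons b rest ih =>
    intro x
    calc x ≤ max x b.length := le_max_left _ _
    _ ≤ _ := ih _

theorem pvLen_le_maxLen_gen : ∀ (arrs : List (List String)) (x : Nat) (a : List String), a ∈ arrs →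
    a.length ≤ arrs.foldl (fun m a => max m a.length) x := by
  intro arrs
  induction arrs with
  | nil => simp
  | cons b rest ih =>
    intro x a ha
    rcases List.mem_cons.mp ha with h | h
    · subst h
      calc a.length ≤ max x a.length := le_max_right _ _
      _ ≤ _ := pvFoldLB rest _
    · exact ih _ a h

theorem pvLen_le_maxLen (arrs : List (List String)) (a : List String) (h : a ∈ arrs) :
    a.length ≤ pvMaxLen arrs :=
  pvLen_le_maxLen_gen arrs 0 a h

theorem pvCol_ge (arrs : List (List String)) (p : Nat) (h : pvMaxLen arrs ≤ p) :
    pvCol arrs p = List.replicate arrs.length "--" := by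
  have hc : ∀ a ∈ arrs, a.getD p "--" = "--" := by
    intro a ha
    exact List.getD_eq_default _ _ (le_trans (pvLen_le_maxLen arrs a ha) h)
  calc pvCol arrs p = arrs.map (fun _ => "--") := List.map_congr_left hc
  _ = _ := by simp

theorem pvEnumerate_range_map {α β : Type} (n : Nat) (f : Nat → α) (g : Int → α → β) :
    ∀ (s : Int), (PySem.List.enumerate ((List.range n).map f) s).map (fun pc => g pc.1 pc.2)
      = (List.range n).map (fun (p : Nat) => g (s + (p : Int)) (f p)) := by
  induction n with
  | zero => simp [PySem.List.enumerate_nil]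
  | succ n ih =>
    intro s
    rw [List.range_succ]
    simp only [List.map_append, PySem.List.enumerate_append]
    simp [ih s, PySem.List.enumerate_cons, PySem.List.enumerate_nil]

theorem pvEnumerate_range_filter {α : Type} (n : Nat) (f : Nat → α) (q : α → Bool) :
    (PySem.List.enumerate ((List.range n).map f) 0).filter (fun pc => q pc.2)
      = ((List.range n).filter (fun p => q (f p))).map (fun (p : Nat) => ((p : Int), f p)) := by
  induction n with
  | zero => simp [PySem.List.enumerate_nil]
  | succ n ih =>
    rw [List.range_succ]
    simp only [List.map_append, PySem.List.enumerate_append, List.filter_append, List.map_append]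
    rw [ih]
    simp [PySem.List.enumerate_cons, PySem.List.enumerate_nil]
    by_cases hq : q (f n) = true <;> simp [hq]

-- B's per-iteration step turns the columns of arrs into the columns of arrs ++ [arr]
theorem pvStepB (arrs : List (List String)) (arr : List String) :
    (PySem.List.enumerate
        (pvCols arrs ++ (PySem.List.pyRange 0 (PySem.List.len arr - PySem.List.len (pvCols arrs)) 1).map
          (fun _ => List.replicate ((arrs.length : Int)).toNat "--")) 0).map
      (fun pc => pc.2 ++ [if pc.1 < PySem.List.len arr then PySem.List.pyGetD arr pc.1 "" else "--"])
    = pvCols (arrs ++ [arr]) := by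
  have hlen : (pvCols arrs).length = pvMaxLen arrs := by simp [pvCols]
  have h1 : (PySem.List.pyRange 0 (PySem.List.len arr - PySem.List.len (pvCols arrs)) 1).map
      (fun _ => List.replicate ((arrs.length : Int)).toNat "--")
      = List.replicate (arr.length - pvMaxLen arrs) (List.replicate arrs.length "--") := by
    rw [List.map_const']
    congr 1
    rw [PySem.List.length_pyRange_one]
    simp [hlen]
  have h2 : pvCols arrs ++ List.replicate (arr.length - pvMaxLen arrs) (List.replicate arrs.length "--")
      = (List.range (max (pvMaxLen arrs) arr.length)).map (pvCol arrs) := by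
    rw [show max (pvMaxLen arrs) arr.length = pvMaxLen arrs + (arr.length - pvMaxLen arrs) by omega,
      List.range_add, List.map_append]
    congr 1
    rw [List.map_map]
    symm
    calc (List.range (arr.length - pvMaxLen arrs)).map (pvCol arrs ∘ (pvMaxLen arrs + ·))
        = (List.range (arr.length - pvMaxLen arrs)).map (fun _ => List.replicate arrs.length "--") := by
          apply List.map_congr_left
          intro j _
          exact pvCol_ge arrs _ (Nat.le_add_right _ j)
      _ = _ := by simp [List.map_const']
  rw [h1, h2,
    pvEnumerate_range_map (max (pvMaxLen arrs) arr.length) (pvCol arrs)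
      (fun (i : Int) (c : List String) => c ++ [if i < PySem.List.len arr then PySem.List.pyGetD arr i "" else "--"]) 0]
  rw [pvCols, pvMaxLen_append]
  apply List.map_congr_left
  intro p hp
  simp only [List.mem_range] at hp
  simp only [pvCol, List.map_append, List.map_cons, List.map_nil, zero_add,
    PySem.List.len_eq, PySem.List.pyGetD_natCast]
  by_cases hL : p < arr.length
  · rw [if_pos (by exact_mod_cast hL)]
    congr 2
    rw [List.getD_eq_getElem?_getD, List.getD_eq_getElem?_getD, List.getElem?_eq_getElem hL]
    simp
  · rw [if_neg (by omega)]
    congr 2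
    rw [List.getD_eq_default _ _ (by omega)]

-- B's per-iteration fold body (syntactically the body of B's inner fold)
def pvStepBF (i : Int) (st : List (List String) × Int) (iteration : List (String × List String)) :
    List (List String) × Int :=
  let pcs := (PySem.Dict.get? (PySem.Dict.mk iteration) "profilecodes").getD []
  if i < PySem.List.len pcs then
    let arr := hex_to_bytes ((PySem.List.pyGet? pcs i).getD "")
    let cols := st.1 ++ (PySem.List.pyRange 0 (PySem.List.len arr - PySem.List.len st.1) 1).map
      (fun _ => List.replicate st.2.toNat "--")
    let cols := (PySem.List.enumerate cols 0).map (fun pc =>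
      pc.2 ++ [if pc.1 < PySem.List.len arr then PySem.List.pyGetD arr pc.1 "" else "--"])
    (cols, st.2 + 1)
  else st

-- B's fold over the iterations maintains (pvCols, count) of the processed arrays
theorem pvBFold (i : Int) (data : List (List (String × List String))) :
    ∀ (arrs : List (List String)),
    (data.foldl (pvStepBF i) (pvCols arrs, (arrs.length : Int)))
    = (pvCols (arrs ++ pvArrs i data), ((arrs ++ pvArrs i data).length : Int)) := by
  induction data with
  | nil => simp [pvArrs]
  | cons it rest ih =>
    intro arrs
    rw [List.foldl_cons, pvArrs_cons]
    by_cases h : i < ((pvPcs it).length : Int)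
    · have hcond : i < PySem.List.len ((PySem.Dict.get? (PySem.Dict.mk it) "profilecodes").getD []) := by
        simpa [pvPcs] using h
      have harr : pvStepBF i (pvCols arrs, (arrs.length : Int)) it
          = (pvCols (arrs ++ [hex_to_bytes ((PySem.List.pyGet? ((PySem.Dict.get? (PySem.Dict.mk it) "profilecodes").getD []) i).getD "")]),
             ((arrs ++ [hex_to_bytes ((PySem.List.pyGet? ((PySem.Dict.get? (PySem.Dict.mk it) "profilecodes").getD []) i).getD "")]).length : Int)) := by
        unfold pvStepBF
        rw [if_pos hcond]
        dsimp only
        rw [pvStepB arrs (hex_to_bytes ((PySem.List.pyGet? ((PySem.Dict.get? (PySem.Dict.mk it) "profilecodes").getD []) i).getD ""))]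
        simp
      rw [harr, if_pos (show i < PySem.List.len (pvPcs it) by simpa using h)]
      have hih := ih (arrs ++ [hex_to_bytes ((PySem.List.pyGet? ((PySem.Dict.get? (PySem.Dict.mk it) "profilecodes").getD []) i).getD "")])
      simp only [pvPcs]
      simpa using hih
    · have harr : pvStepBF i (pvCols arrs, (arrs.length : Int)) it = (pvCols arrs, (arrs.length : Int)) := by
        unfold pvStepBF
        rw [if_neg (show ¬ i < PySem.List.len ((PySem.Dict.get? (PySem.Dict.mk it) "profilecodes").getD []) by
          simpa [pvPcs] using h)]
      rw [harr, if_neg (show ¬ i < PySem.List.len (pvPcs it) by simpa using h)]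
      exact ih arrs

-- A's collected strings, mapped through hex_to_bytes, are pvArrs
theorem pvAStrings (i : Int) (data : List (List (String × List String))) :
    ∀ (acc : List String),
    (data.foldl (fun acc iteration =>
      let pcs := (PySem.Dict.get? (PySem.Dict.mk iteration) "profilecodes").getD []
      if i < PySem.List.len pcs then
        acc ++ [(PySem.List.pyGet? pcs i).getD ""]
      else acc) acc).map hex_to_bytes
    = acc.map hex_to_bytes ++ pvArrs i data := by
  induction data with
  | nil => simp [pvArrs]
  | cons it rest ih =>
    intro acc
    rw [List.foldl_cons, pvArrs_cons]
    by_cases h : i < ((pvPcs it).length : Int)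
    · simp only [pvPcs] at h ⊢
      rw [if_pos (by simpa using h), if_pos (by simpa using h), ih]
      simp
    · simp only [pvPcs] at h ⊢
      rw [if_neg (by simpa using h), if_neg (by simpa using h), ih]

-- A's values_at_pos loop is the column at pos
theorem pvValues (arrs : List (List String)) (p : Nat) :
    arrs.foldl (fun values_at_pos arr =>
      if ((p : Nat) : Int) < PySem.List.len arr then
        values_at_pos ++ [(PySem.List.pyGet? arr ((p : Nat) : Int)).getD ""]
      else values_at_pos ++ ["--"]) []
    = pvCol arrs p := by
  have gen : ∀ (arrs : List (List String)) (acc : List String),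
      arrs.foldl (fun values_at_pos arr =>
        if ((p : Nat) : Int) < PySem.List.len arr then
          values_at_pos ++ [(PySem.List.pyGet? arr ((p : Nat) : Int)).getD ""]
        else values_at_pos ++ ["--"]) acc
      = acc ++ arrs.map (fun a => a.getD p "--") := by
    intro arrs
    induction arrs with
    | nil => simp
    | cons a rest ih =>
      intro acc
      rw [List.foldl_cons]
      by_cases h : p < a.length
      · rw [if_pos (by simpa using h), ih]
        simp [List.getD_eq_getElem?_getD, h]
      · rw [if_neg (by simpa using h), ih]
        simp only [List.map_cons, List.append_assoc, List.singleton_append]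
        rw [List.getD_eq_default _ _ (by omega)]
  simpa [pvCol] using gen arrs []

theorem pvMaxCast (arrs : List (List String)) : ∀ (x : Nat),
    (arrs.map PySem.List.len).foldl max ((x : Nat) : Int) = ((arrs.foldl (fun m a => max m a.length) x : Nat) : Int) := by
  induction arrs with
  | nil => simp
  | cons a rest ih =>
    intro x
    rw [List.map_cons, List.foldl_cons, List.foldl_cons]
    have : max ((x : Nat) : Int) (PySem.List.len a) = ((max x a.length : Nat) : Int) := by
      simp [Nat.cast_max]
    rw [this, ih]

-- A's inner fold over increasing fresh Int keys appends to the items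
theorem pvFoldInsert {V : Type} (f : Int → V) (Q : Int → Prop) [DecidablePred Q] :
    ∀ (n : Nat) (a : Int) (d : PySem.Dict Int V), (∀ k ∈ d.keys, k < a) →
    ((PySem.List.pyRange a (a + n) 1).foldl (fun d pos => if Q pos then d.insert pos (f pos) else d) d).items
      = d.items ++ ((PySem.List.pyRange a (a + n) 1).filter (fun pos => decide (Q pos))).map (fun pos => (pos, f pos)) := by
  intro n
  induction n with
  | zero =>
    intro a d _
    rw [show a + ((0 : Nat) : Int) = a by omega, PySem.List.pyRange_one_eq_nil le_rfl]
    simp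
  | succ n ih =>
    intro a d hk
    rw [show a + ((n + 1 : Nat) : Int) = (a + 1) + (n : Int) by push_cast; ring,
      PySem.List.pyRange_one_cons (by omega)]
    simp only [List.foldl_cons, List.filter_cons]
    have hna : d.contains a = false := by
      cases hcc : d.contains a with
      | false => rfl
      | true =>
        have hmem : a ∈ d.keys := (PySem.Dict.contains_iff_mem_keys d a).mp hcc
        exact absurd (hk a hmem) (by omega)
    by_cases hq : Q a
    · have hkeys : ∀ k ∈ (d.insert a (f a)).keys, k < a + 1 := by
        intro k hkm
        rcases (PySem.Dict.mem_keys_insert d a k (f a)).mp hkm with h | h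
        · omega
        · have := hk k h; omega
      rw [if_pos hq, ih (a + 1) _ hkeys, PySem.Dict.items_insert_of_not_contains d (f a) hna]
      simp [hq]
    · have hkeys : ∀ k ∈ d.keys, k < a + 1 := by intro k hkm; have := hk k hkm; omega
      rw [if_neg hq, ih (a + 1) _ hkeys]
      simp [hq]

-- per-index: A's inner dict items equal B's filtered enumerated columns
theorem pvInnerEq (i : Int) (data : List (List (String × List String))) :
    (pvInnerA i data).items = pvEntryB i data := by
  unfold pvInnerA pvEntryB
  by_cases ha : pvArrs i data = []
  · simp [ha, pvCols, pvMaxLen, PySem.List.enumerate_nil]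
    rfl
  · rw [if_neg ha]
    dsimp only
    rw [show ((pvMaxLen (pvArrs i data) : Nat) : Int) = 0 + ((pvMaxLen (pvArrs i data) : Nat) : Int) by ring]
    rw [pvFoldInsert
      (fun pos => (pvArrs i data).foldl (fun values_at_pos arr =>
        if pos < PySem.List.len arr then
          values_at_pos ++ [(PySem.List.pyGet? arr pos).getD ""]
        else values_at_pos ++ ["--"]) [])
      (fun pos => 1 < (PySem.Set.ofList ((pvArrs i data).foldl (fun values_at_pos arr =>
        if pos < PySem.List.len arr then
          values_at_pos ++ [(PySem.List.pyGet? arr pos).getD ""]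
        else values_at_pos ++ ["--"]) [])).length)
      (pvMaxLen (pvArrs i data)) 0 PySem.Dict.empty (by simp)]
    rw [show (0 : Int) + ((pvMaxLen (pvArrs i data) : Nat) : Int) = ((pvMaxLen (pvArrs i data) : Nat) : Int) by ring]
    rw [PySem.List.pyRange_zero_natCast, List.filter_map, List.map_map]
    rw [pvCols, pvEnumerate_range_filter (pvMaxLen (pvArrs i data)) (pvCol (pvArrs i data))
      (fun col => decide (1 < (PySem.Set.ofList col).length))]
    simp only [Function.comp_def, pvValues]
    rfl

-- A's outer step appends one entry
theorem pvStepA_items (data : List (List (String × List String))) (i : Int)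
    (d : PySem.Dict String (PySem.Dict Int (List String))) (h : d.contains (pvKey i) = false) :
    (pvStepA data d i).items = d.items ++ [(pvKey i, pvInnerA i data)] := by
  unfold pvStepA
  dsimp only
  rw [show "PROFILE[" ++ PySem.Int.toStr i ++ "]" = pvKey i from rfl]
  have hstr : (data.foldl (fun acc iteration =>
      let pcs := (PySem.Dict.get? (PySem.Dict.mk iteration) "profilecodes").getD []
      if i < PySem.List.len pcs then
        acc ++ [(PySem.List.pyGet? pcs i).getD ""]
      else acc) []).map hex_to_bytes = pvArrs i data := by
    simpa using pvAStrings i data []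
  have hmapmem : ∀ (v : PySem.Dict Int (List String)),
      d.items.map (fun p => if (p.1 == pvKey i) = true then (pvKey i, v) else p)
      = d.items := by
    intro v
    have : d.items.map (fun p => if (p.1 == pvKey i) = true then (pvKey i, v) else p)
        = d.items.map id := by
      apply List.map_congr_left
      intro p hp
      have hne : p.1 ≠ pvKey i := by
        intro he
        have hk2 : pvKey i ∈ d.keys := by
          simp only [PySem.Dict.keys]
          exact he ▸ List.mem_map_of_mem hp
        rw [(PySem.Dict.contains_iff_mem_keys d (pvKey i)).mpr hk2] at h
        simp at h
      simp [hne]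
    rw [this, List.map_id]
  by_cases hs : (data.foldl (fun acc iteration =>
      let pcs := (PySem.Dict.get? (PySem.Dict.mk iteration) "profilecodes").getD []
      if i < PySem.List.len pcs then
        acc ++ [(PySem.List.pyGet? pcs i).getD ""]
      else acc) []) = []
  · rw [if_pos hs]
    have hA : pvArrs i data = [] := by rw [← hstr, hs]; rfl
    rw [PySem.Dict.items_insert_of_not_contains d _ h, pvInnerA, if_pos hA]
  · rw [if_neg hs]
    rw [hstr]
    have hA : pvArrs i data ≠ [] := by
      rw [← hstr]
      simpa using hs
    rw [if_pos (by simpa using hA)]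
    obtain ⟨a, t, hat⟩ : ∃ a t, pvArrs i data = a :: t := by
      rcases h' : pvArrs i data with _ | ⟨a, t⟩
      · exact absurd h' hA
      · exact ⟨a, t, rfl⟩
    have hmax : (PySem.List.max? ((pvArrs i data).map PySem.List.len) (fun x => x)).getD 0
        = ((pvMaxLen (pvArrs i data) : Nat) : Int) := by
      rw [hat, List.map_cons, PySem.List.max?_id_cons, Option.getD_some]
      have := pvMaxCast t a.length
      simp only [PySem.List.len_eq] at this ⊢
      rw [this]
      simp [pvMaxLen]
    rw [hmax, PySem.Dict.getD_insert_self]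
    rw [PySem.Dict.items_insert_of_contains _ _ (PySem.Dict.contains_insert_self d (pvKey i) PySem.Dict.empty),
      PySem.Dict.items_insert_of_not_contains d _ h]
    rw [List.map_append, hmapmem]
    have hin : pvInnerA i data = (PySem.List.pyRange 0 ((pvMaxLen (pvArrs i data) : Nat) : Int) 1).foldl
        (fun inner byte_pos =>
          let values_at_pos := (pvArrs i data).foldl (fun values_at_pos arr =>
            if byte_pos < PySem.List.len arr then
              values_at_pos ++ [(PySem.List.pyGet? arr byte_pos).getD ""]
            else values_at_pos ++ ["--"]) []
          if 1 < (PySem.Set.ofList values_at_pos).length then inner.insert byte_pos values_at_pos else inner)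
        PySem.Dict.empty := by
      rw [pvInnerA, if_neg hA]
    rw [← hin]
    simp

-- ===== VERDICT (by name: the statement is the Claim_ definition above) =====
theorem analyze_profilecode_changes_spec : Claim_equal_analyze_profilecode_changes := by
  intro data _ _
  unfold Spec_analyze_profilecode_changes
  have hr : PySem.List.pyRange 0 5 1 = [0, 1, 2, 3, 4] := by decide
  have h0 : (pvStepA data PySem.Dict.empty 0).items = [(pvKey 0, pvInnerA 0 data)] := by
    rw [pvStepA_items data 0 _ (PySem.Dict.contains_empty _)]
    rfl
  have c1 : (pvStepA data PySem.Dict.empty 0).contains (pvKey 1) = false := by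
    rw [PySem.Dict.contains_eq_decide_mem_keys]
    simp only [PySem.Dict.keys, h0]
    simp only [List.map_cons, List.map_nil, List.mem_cons, List.not_mem_nil]
    decide
  have h1 : (pvStepA data (pvStepA data PySem.Dict.empty 0) 1).items = [(pvKey 0, pvInnerA 0 data), (pvKey 1, pvInnerA 1 data)] := by
    rw [pvStepA_items data 1 _ c1, h0]
    simp
  have c2 : (pvStepA data (pvStepA data PySem.Dict.empty 0) 1).contains (pvKey 2) = false := by
    rw [PySem.Dict.contains_eq_decide_mem_keys]
    simp only [PySem.Dict.keys, h1]
    simp only [List.map_cons, List.map_nil, List.mem_cons, List.not_mem_nil]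
    decide
  have h2 : (pvStepA data (pvStepA data (pvStepA data PySem.Dict.empty 0) 1) 2).items = [(pvKey 0, pvInnerA 0 data), (pvKey 1, pvInnerA 1 data), (pvKey 2, pvInnerA 2 data)] := by
    rw [pvStepA_items data 2 _ c2, h1]
    simp
  have c3 : (pvStepA data (pvStepA data (pvStepA data PySem.Dict.empty 0) 1) 2).contains (pvKey 3) = false := by
    rw [PySem.Dict.contains_eq_decide_mem_keys]
    simp only [PySem.Dict.keys, h2]
    simp only [List.map_cons, List.map_nil, List.mem_cons, List.not_mem_nil]
    decide
  have h3 : (pvStepA data (pvStepA data (pvStepA data (pvStepA data PySem.Dict.empty 0) 1) 2) 3).items = [(pvKey 0, pvInnerA 0 data), (pvKey 1, pvInnerA 1 data), (pvKey 2, pvInnerA 2 data), (pvKey 3, pvInnerA 3 data)] := by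
    rw [pvStepA_items data 3 _ c3, h2]
    simp
  have c4 : (pvStepA data (pvStepA data (pvStepA data (pvStepA data PySem.Dict.empty 0) 1) 2) 3).contains (pvKey 4) = false := by
    rw [PySem.Dict.contains_eq_decide_mem_keys]
    simp only [PySem.Dict.keys, h3]
    simp only [List.map_cons, List.map_nil, List.mem_cons, List.not_mem_nil]
    decide
  have h4 : (pvStepA data (pvStepA data (pvStepA data (pvStepA data (pvStepA data PySem.Dict.empty 0) 1) 2) 3) 4).items = [(pvKey 0, pvInnerA 0 data), (pvKey 1, pvInnerA 1 data), (pvKey 2, pvInnerA 2 data), (pvKey 3, pvInnerA 3 data), (pvKey 4, pvInnerA 4 data)] := by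
    rw [pvStepA_items data 4 _ c4, h3]
    simp
  have hBf : ∀ i : Int, (data.foldl (pvStepBF i) ([], 0))
      = (pvCols (pvArrs i data), ((pvArrs i data).length : Int)) := by
    intro i
    have := pvBFold i data []
    simpa [pvCols, pvMaxLen] using this
  calc analyze_profilecode_changes data
      = ((PySem.List.pyRange 0 5 1).foldl (pvStepA data) PySem.Dict.empty).items.map
          (fun p => (p.1, p.2.items)) := rfl
    _ = [(pvKey 0, pvEntryB 0 data), (pvKey 1, pvEntryB 1 data), (pvKey 2, pvEntryB 2 data),
         (pvKey 3, pvEntryB 3 data), (pvKey 4, pvEntryB 4 data)] := by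
        rw [hr]
        simp only [List.foldl_cons, List.foldl_nil]
        rw [h4]
        simp only [List.map_cons, List.map_nil]
        rw [pvInnerEq 0 data, pvInnerEq 1 data, pvInnerEq 2 data, pvInnerEq 3 data, pvInnerEq 4 data]
    _ = analyze_profilecode_changes_alt data := by
        have hBdef : analyze_profilecode_changes_alt data
            = (PySem.List.pyRange 0 5 1).foldl (fun result profile_idx =>
                result ++ [("PROFILE[" ++ PySem.Int.toStr profile_idx ++ "]",
                  (PySem.List.enumerate (data.foldl (pvStepBF profile_idx) ([], 0)).1 0).filter
                    (fun pc => 1 < (PySem.Set.ofList pc.2).length))]) [] := rfl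
        rw [hBdef, hr]
        simp only [List.foldl_cons, List.foldl_nil]
        rw [hBf 0, hBf 1, hBf 2, hBf 3, hBf 4]
        rfl
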